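-- pv_equiv track=rewrite | github.com/WorldofKerry/Python2Verilog | tests/complete/functions.py | rectangle_filled
-- ===== SOURCE A (Python) =====
-- def rectangle_filled(s_x, s_y, height, width):
--     i0 = 0
--     while i0 < width:
--         i1 = 0
--         while i1 < height:
--             yield (s_x + i1, s_y + i0)
--             i1 = i1 + 1
--         i0 = i0 + 1
-- ===== SOURCE B (Python) =====
-- def rectangle_filled(s_x, s_y, height, width):
--     h = max(height, 0)
--     for idx in range(max(width, 0) * h):
--         i0, i1 = divmod(idx, h)
--         yield (s_x + i1, s_y + i0)
-- ===== Notes on version B (the rewrite author's own statement) =====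
-- stated objective: alternative
-- what changed: Replaces the two nested while-loops with a single flat loop over range(width*height), recovering the column/row indices of each cell by divmod instead of maintaining two counters.
import Mathlib
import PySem

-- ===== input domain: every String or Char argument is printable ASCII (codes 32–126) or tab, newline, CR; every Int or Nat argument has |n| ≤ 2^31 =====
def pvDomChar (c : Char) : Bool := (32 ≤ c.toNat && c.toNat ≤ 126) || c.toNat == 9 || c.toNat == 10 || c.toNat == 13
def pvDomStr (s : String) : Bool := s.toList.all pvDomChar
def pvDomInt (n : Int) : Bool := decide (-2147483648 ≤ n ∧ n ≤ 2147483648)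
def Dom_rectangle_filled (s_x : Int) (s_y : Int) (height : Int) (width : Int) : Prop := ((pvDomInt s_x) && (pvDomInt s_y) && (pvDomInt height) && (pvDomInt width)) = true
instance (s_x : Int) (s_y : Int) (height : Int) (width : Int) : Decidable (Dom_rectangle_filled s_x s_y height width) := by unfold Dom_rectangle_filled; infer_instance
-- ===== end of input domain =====

-- B replaces A's two nested while-loops by one flat loop over range(width*height) with divmod
-- index arithmetic (objective: alternative decomposition, same cost).


-- ===== PORT A =====
-- inner 'while i1 < height: yield (s_x + i1, s_y + i0); i1 += 1'
def rfInnerA (s_x : Int) (s_y : Int) (height : Int) (i0 : Int) (i1 : Int) : List (Int × Int) :=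
  if i1 < height then (s_x + i1, s_y + i0) :: rfInnerA s_x s_y height i0 (i1 + 1) else []
termination_by (height - i1).toNat
decreasing_by omega

-- outer 'while i0 < width: <inner loop with i1 = 0>; i0 += 1'
def rfOuterA (s_x : Int) (s_y : Int) (height : Int) (width : Int) (i0 : Int) : List (Int × Int) :=
  if i0 < width then rfInnerA s_x s_y height i0 0 ++ rfOuterA s_x s_y height width (i0 + 1) else []
termination_by (width - i0).toNat
decreasing_by omega

def rectangle_filled (s_x : Int) (s_y : Int) (height : Int) (width : Int) : List (Int × Int) :=
  rfOuterA s_x s_y height width 0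

-- ===== PORT B =====
-- h = max(height, 0); for idx in range(max(width, 0) * h): i0, i1 = divmod(idx, h); yield (s_x + i1, s_y + i0)
def rectangle_filled_alt (s_x : Int) (s_y : Int) (height : Int) (width : Int) : List (Int × Int) :=
  let h := max height 0
  (PySem.List.pyRange 0 (max width 0 * h) 1).map
    (fun idx => (s_x + PySem.Int.mod idx h, s_y + PySem.Int.floordiv idx h))

-- ===== PRECONDITION & SPEC =====
def Spec_rectangle_filled (s_x : Int) (s_y : Int) (height : Int) (width : Int) (out : List (Int × Int)) : Prop := out = rectangle_filled_alt s_x s_y height width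
instance (s_x : Int) (s_y : Int) (height : Int) (width : Int) (out : List (Int × Int)) : Decidable (Spec_rectangle_filled s_x s_y height width out) := by unfold Spec_rectangle_filled; infer_instance

-- ===== CLAIM (what is proved, stated in full; the proofs are below) =====
def Claim_equal_rectangle_filled : Prop := ∀ (s_x : Int) (s_y : Int) (height : Int) (width : Int), Dom_rectangle_filled s_x s_y height width → Spec_rectangle_filled s_x s_y height width (rectangle_filled s_x s_y height width)

-- ===== LEMMAS AND PROOFS =====

-- A's inner loop produces one column of height.toNat cells.
theorem rfInnerA_eq (s_x s_y height i0 : Int) :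
    ∀ (n : Nat) (i1 : Int), (height - i1).toNat = n →
      rfInnerA s_x s_y height i0 i1
        = (List.range n).map (fun (k : Nat) => (s_x + i1 + (k : Int), s_y + i0)) := by
  intro n
  induction n with
  | zero =>
    intro i1 h
    rw [rfInnerA]
    simp only [List.range_zero, List.map_nil]
    rw [if_neg (by omega)]
  | succ m ih =>
    intro i1 h
    rw [rfInnerA, if_pos (by omega)]
    rw [ih (i1 + 1) (by omega)]
    rw [List.range_succ_eq_map]
    simp only [List.map_cons, List.map_map]
    congr 1
    · norm_num
    · apply List.map_congr_left
      intro k _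
      simp only [Function.comp_apply, Prod.mk.injEq]
      constructor
      · push_cast; ring
      · trivial

-- A's outer loop concatenates the remaining columns.
theorem rfOuterA_eq (s_x s_y height width : Int) :
    ∀ (n : Nat) (i0 : Int), (width - i0).toNat = n →
      rfOuterA s_x s_y height width i0
        = (List.range n).flatMap (fun (j : Nat) =>
            (List.range height.toNat).map (fun (k : Nat) => (s_x + (k : Int), s_y + i0 + (j : Int)))) := by
  intro n
  induction n with
  | zero =>
    intro i0 h
    rw [rfOuterA]
    simp only [List.range_zero, List.flatMap_nil]
    rw [if_neg (by omega)]
  | succ m ih =>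
    intro i0 h
    rw [rfOuterA, if_pos (by omega)]
    rw [ih (i0 + 1) (by omega)]
    rw [List.range_succ_eq_map]
    simp only [List.flatMap_cons, List.flatMap_map]
    congr 1
    · rw [rfInnerA_eq s_x s_y height i0 height.toNat 0 (by omega)]
      apply List.map_congr_left
      intro k _
      norm_num
    · apply List.flatMap_congr
      intro j _
      apply List.map_congr_left
      intro k _
      simp only [Prod.mk.injEq]
      constructor
      · trivial
      · push_cast; ring

-- range (w*h) splits into w blocks of h, giving exactly B's flat traversal.
theorem range_mul_flatMap (f : Nat → Int × Int) (w h : Nat) :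
    (List.range (w * h)).map f
      = (List.range w).flatMap (fun j => (List.range h).map (fun k => f (j * h + k))) := by
  induction w with
  | zero => simp
  | succ m ih =>
    rw [Nat.succ_mul, List.range_add, List.map_append, ih, List.range_succ,
      List.flatMap_append]
    simp [List.map_map, Function.comp]

-- ===== VERDICT (by name: the statement is the Claim_ definition above) =====
theorem rectangle_filled_spec : Claim_equal_rectangle_filled := by
  intro s_x s_y height width _
  unfold Spec_rectangle_filled rectangle_filled rectangle_filled_alt
  rw [rfOuterA_eq s_x s_y height width width.toNat 0 (by omega)]
  show _ = List.map
      (fun idx => (s_x + PySem.Int.mod idx (max height 0), s_y + PySem.Int.floordiv idx (max height 0)))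
      (PySem.List.pyRange 0 (max width 0 * max height 0) 1)
  rw [show max width 0 * max height 0 = (((width.toNat * height.toNat : Nat)) : Int) from by
        rw [← Int.ofNat_toNat width, ← Int.ofNat_toNat height]; push_cast; ring]
  rw [← Int.ofNat_toNat height]
  rw [PySem.List.pyRange_zero_natCast, List.map_map,
    range_mul_flatMap _ width.toNat height.toNat]
  apply List.flatMap_congr
  intro j _
  apply List.map_congr_left
  intro k hk
  rw [List.mem_range] at hk
  have h1 : (j * height.toNat + k) % height.toNat = k := by
    rw [Nat.mul_comm, Nat.mul_add_mod, Nat.mod_eq_of_lt hk]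
  have h2 : (j * height.toNat + k) / height.toNat = j := by
    rw [Nat.mul_comm, Nat.mul_add_div (by omega : 0 < height.toNat), Nat.div_eq_of_lt hk]
    omega
  simp only [Function.comp_apply, PySem.Int.mod_natCast, PySem.Int.floordiv_natCast,
    h1, h2, Prod.mk.injEq]
  constructor
  · trivial
  · ring
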